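-- pv_equiv track=rewrite | github.com/jeffzi/lua-ecs-benchmark | scripts/export.py | find_basename
-- ===== SOURCE A (Python) =====
-- def find_basename(name: str, frameworks: set[str]) -> str:
--     """Find root ancestor that exists in framework set."""
--     best = name
--     current = name
--     while "-" in current:
--         current = current.rsplit("-", 1)[0]
--         if current in frameworks:
--             best = current
--     return best
-- ===== SOURCE B (Python) =====
-- def find_basename(name: str, frameworks: set[str]) -> str:
--     """Find root ancestor that exists in framework set."""
--     prefix = ""
--     for ch in name:
--         if ch == "-" and prefix in frameworks:
--             return prefix
--         prefix += ch
--     return name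
-- ===== Notes on version B (the rewrite author's own statement) =====
-- stated objective: simpler
-- what changed: Replaces the right-to-left rsplit-and-overwrite loop (which keeps a running 'best') with a single left-to-right character scan that returns early at the shortest hyphen-prefix found in the framework set.
import Mathlib
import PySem

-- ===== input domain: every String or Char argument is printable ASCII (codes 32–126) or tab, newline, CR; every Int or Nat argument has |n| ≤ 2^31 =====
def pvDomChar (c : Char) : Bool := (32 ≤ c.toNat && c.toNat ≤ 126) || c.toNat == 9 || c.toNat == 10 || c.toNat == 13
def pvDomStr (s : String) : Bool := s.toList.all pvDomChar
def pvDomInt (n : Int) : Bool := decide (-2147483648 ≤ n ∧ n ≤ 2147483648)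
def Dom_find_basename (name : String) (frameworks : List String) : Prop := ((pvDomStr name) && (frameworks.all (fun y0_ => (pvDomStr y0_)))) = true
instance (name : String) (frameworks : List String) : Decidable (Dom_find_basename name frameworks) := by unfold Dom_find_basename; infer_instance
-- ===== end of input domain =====

-- B replaces A's right-to-left rsplit-and-overwrite loop by a single left-to-right scan
-- returning early at the shortest hyphen-prefix present in the framework set (objective: simpler).


-- ===== PORT A =====
-- Hand port of the combination `"-" in current` / `current.rsplit("-", 1)[0]` (PySem has no
-- rsplit): `cutLast cs` returns `some p` with p = the part of cs before its LAST '-' — exactly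
-- current.rsplit("-", 1)[0] when "-" in current — and `none` exactly when "-" not in current.
def cutLast : List Char → Option (List Char)
  | [] => none
  | c :: cs =>
    match cutLast cs with
    | some p => some (c :: p)
    | none => if c = '-' then some [] else none

theorem cutLast_length : ∀ (cs p : List Char), cutLast cs = some p → p.length < cs.length := by
  intro cs
  induction cs with
  | nil => intro p h; simp [cutLast] at h
  | cons c cs ih =>
    intro p h
    simp only [cutLast] at h
    cases hc : cutLast cs with
    | some q =>
      rw [hc] at h
      cases h
      have := ih q hc
      simp; omega
    | none =>
      rw [hc] at h
      by_cases hd : c = '-' <;> simp [hd] at h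
      subst h; simp

-- the while loop of A: best/current as List Char
def findGoA (frameworks : List String) (best current : List Char) : List Char :=
  match h : cutLast current with
  | none => best
  | some c' =>
    findGoA frameworks (if PySem.Set.contains frameworks (String.ofList c') then c' else best) c'
termination_by current.length
decreasing_by exact cutLast_length current c' h

def find_basename (name : String) (frameworks : List String) : String :=
  String.ofList (findGoA frameworks name.toList name.toList)

-- ===== PORT B =====
-- the for loop of B: prefix accumulator, early return as Option
def findGoB (frameworks : List String) (prefix_ rest : List Char) : Option (List Char) :=
  match rest with
  | [] => none
  | c :: r =>
    if c = '-' && PySem.Set.contains frameworks (String.ofList prefix_) then some prefix_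
    else findGoB frameworks (prefix_ ++ [c]) r

def find_basename_alt (name : String) (frameworks : List String) : String :=
  match findGoB frameworks [] name.toList with
  | some p => String.ofList p
  | none => name

-- ===== PRECONDITION & SPEC =====
def Spec_find_basename (name : String) (frameworks : List String) (out : String) : Prop := out = find_basename_alt name frameworks
instance (name : String) (frameworks : List String) (out : String) : Decidable (Spec_find_basename name frameworks out) := by unfold Spec_find_basename; infer_instance

-- ===== CLAIM (what is proved, stated in full; the proofs are below) =====
def Claim_equal_find_basename : Prop := ∀ (name : String) (frameworks : List String), Dom_find_basename name frameworks → Spec_find_basename name frameworks (find_basename name frameworks)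

-- ===== LEMMAS AND PROOFS =====

-- all proper prefixes of cs that end just before a '-', shortest first
def cands : List Char → List (List Char)
  | [] => []
  | c :: rest => (if c = '-' then [([] : List Char)] else []) ++ (cands rest).map (c :: ·)

def memF (frameworks : List String) (p : List Char) : Bool :=
  PySem.Set.contains frameworks (String.ofList p)

theorem cands_of_no_hyphen : ∀ (cs : List Char), '-' ∉ cs → cands cs = [] := by
  intro cs
  induction cs with
  | nil => intro _; rfl
  | cons c rest ih =>
    intro h
    simp only [List.mem_cons, not_or] at h
    simp [cands, ih h.2, Ne.symm h.1]

theorem cands_append_last : ∀ (xs t : List Char), '-' ∉ t →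
    cands (xs ++ '-' :: t) = cands xs ++ [xs] := by
  intro xs
  induction xs with
  | nil => intro t ht; simp [cands, cands_of_no_hyphen t ht]
  | cons c xs ih =>
    intro t ht
    simp only [List.cons_append, cands, ih t ht, List.map_append, List.map_cons, List.map_nil]
    simp [List.append_assoc]

theorem cutLast_none : ∀ (cs : List Char), cutLast cs = none → '-' ∉ cs := by
  intro cs
  induction cs with
  | nil => intro _; simp
  | cons c cs ih =>
    intro h
    simp only [cutLast] at h
    cases hc : cutLast cs with
    | some q => rw [hc] at h; cases h
    | none =>
      rw [hc] at h
      by_cases hd : c = '-'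
      · simp [hd] at h
      · simp only [List.mem_cons, not_or]
        exact ⟨fun he => hd he.symm, ih hc⟩

theorem cutLast_some : ∀ (cs p : List Char), cutLast cs = some p →
    ∃ t, cs = p ++ '-' :: t ∧ '-' ∉ t := by
  intro cs
  induction cs with
  | nil => intro p h; simp [cutLast] at h
  | cons c cs ih =>
    intro p h
    simp only [cutLast] at h
    cases hc : cutLast cs with
    | some q =>
      rw [hc] at h
      cases h
      obtain ⟨t, h1, h2⟩ := ih q hc
      exact ⟨t, by simp [h1], h2⟩
    | none =>
      rw [hc] at h
      by_cases hd : c = '-' <;> simp [hd] at h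
      subst h
      exact ⟨cs, by simp [hd], cutLast_none cs hc⟩

-- cands of cs, computed along cutLast's right-to-left split
theorem cands_cut (cs p : List Char) (hc : cutLast cs = some p) :
    cands cs = cands p ++ [p] := by
  obtain ⟨t, h1, h2⟩ := cutLast_some cs p hc
  subst h1
  exact cands_append_last p t h2

-- A's loop computes: first member of cands in frameworks, else `best`
theorem findGoA_eq : ∀ (fw : List String) (best cs : List Char),
    findGoA fw best cs = ((cands cs).find? (memF fw)).getD best := by
  intro fw best cs
  fun_induction findGoA fw best cs with
  | case1 best cs hc =>
    rw [cands_of_no_hyphen cs (cutLast_none cs hc)]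
    rfl
  | case2 best cs p hc ih =>
    simp only [dite_eq_ite] at ih
    rw [ih, cands_cut cs p hc]
    simp only [List.find?_append]
    cases hf : (cands p).find? (memF fw) with
    | some x => simp
    | none =>
      simp only [Option.none_or]
      by_cases hm : memF fw p = true
      · simp [List.find?, memF] at hm ⊢
        simp [hm]
      · simp only [memF] at hm
        have hm' : String.ofList p ∉ fw := by simpa [PySem.Set.contains_iff] using hm
        simp [List.find?, memF, hm']

-- B's loop computes: first member of cands (shifted by the accumulator) in frameworks
theorem findGoB_eq : ∀ (rest : List Char) (fw : List String) (pre : List Char),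
    findGoB fw pre rest = ((cands rest).map (pre ++ ·)).find? (memF fw) := by
  intro rest
  induction rest with
  | nil => intro fw pre; rfl
  | cons c r ih =>
    intro fw pre
    by_cases hd : c = '-'
    · subst hd
      have hmap : (cands ('-' :: r)).map (pre ++ ·)
          = pre :: (cands r).map ((pre ++ ['-']) ++ ·) := by
        simp [cands, Function.comp_def, List.append_assoc]
      rw [hmap, findGoB]
      by_cases hm : memF fw pre = true
      · rw [List.find?_cons_of_pos hm]
        simp only [memF] at hm
        have hm' : String.ofList pre ∈ fw := by simpa [PySem.Set.contains_iff] using hm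
        simp [hm']
      · rw [List.find?_cons_of_neg (by simpa using hm)]
        simp only [memF] at hm
        simp only [Bool.not_eq_true] at hm
        simp only [hm, Bool.and_false, Bool.false_eq_true, if_false]
        exact ih fw (pre ++ ['-'])
    · have hmap : (cands (c :: r)).map (pre ++ ·)
          = (cands r).map ((pre ++ [c]) ++ ·) := by
        simp [cands, hd, Function.comp_def, List.append_assoc]
      rw [hmap, findGoB]
      simp only [hd, decide_false, Bool.false_and, Bool.false_eq_true, if_false]
      exact ih fw (pre ++ [c])

-- ===== VERDICT (by name: the statement is the Claim_ definition above) =====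
theorem find_basename_spec : Claim_equal_find_basename := by
  intro name fw _
  unfold Spec_find_basename find_basename find_basename_alt
  rw [findGoA_eq fw name.toList name.toList, findGoB_eq name.toList fw []]
  simp only [List.nil_append, List.map_id']
  cases hf : (cands name.toList).find? (memF fw) with
  | some p => simp
  | none => simp [String.ofList_toList]
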